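-- pv_equiv track=rewrite | github.com/clara8043/aima-python | a2_q2.py | check_teams
-- ===== SOURCE A (Python) =====
-- def check_teams(graph, csp_sol):
-- 	if csp_sol==None:
-- 		return False
-- 	for i in range(len(graph)-1) :
-- 		for j in range(i+1,len(graph)):
-- 			if (csp_sol[i]==csp_sol[j]) and (j in graph[i]):
-- 				return False
-- 	return True
-- ===== SOURCE B (Python) =====
-- def check_teams(graph, csp_sol):
--     if csp_sol == None:
--         return False
--     n = len(graph)
--     for i, row in enumerate(graph):
--         for j in row:
--             if i < j < n and csp_sol[j] == csp_sol[i]: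
--                 return False
--     return True
-- ===== Notes on version B (the rewrite author's own statement) =====
-- stated objective: alternative
-- what changed: Replaced the scan over all vertex pairs (with a membership test into the adjacency list) by a single pass over the adjacency lists themselves, comparing each vertex's color only with its listed forward neighbors.
-- outside the precondition, e.g. on check_teams([[2, 1], [0, 2], [0, 1]], [0, 0]): A returns False, B raises IndexError
import Mathlib
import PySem

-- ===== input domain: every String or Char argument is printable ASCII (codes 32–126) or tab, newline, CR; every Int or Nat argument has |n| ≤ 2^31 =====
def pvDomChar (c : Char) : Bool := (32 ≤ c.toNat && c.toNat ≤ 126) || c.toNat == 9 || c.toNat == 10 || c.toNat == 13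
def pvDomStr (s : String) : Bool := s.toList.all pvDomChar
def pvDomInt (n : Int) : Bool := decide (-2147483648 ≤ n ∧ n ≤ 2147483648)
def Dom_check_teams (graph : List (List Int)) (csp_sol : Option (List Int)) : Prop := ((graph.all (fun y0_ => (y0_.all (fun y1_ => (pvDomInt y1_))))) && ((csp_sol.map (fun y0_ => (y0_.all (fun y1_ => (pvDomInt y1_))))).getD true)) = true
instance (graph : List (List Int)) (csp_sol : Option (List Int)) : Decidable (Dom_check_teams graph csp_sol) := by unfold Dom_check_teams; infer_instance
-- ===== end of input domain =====

-- B replaces A's all-pairs scan by a single pass over the adjacency lists (alternative algorithm); return values agree on Pre_.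


-- ===== PORT A =====
-- early 'return False' in the doubly-nested loop = negation of 'any pair conflicts'
def check_teams (graph : List (List Int)) (csp_sol : Option (List Int)) : Bool :=
  match csp_sol with
  | none => false
  | some sol =>
    !((PySem.List.pyRange 0 ((graph.length : Int) - 1) 1).any (fun i =>
        (PySem.List.pyRange (i + 1) (graph.length : Int) 1).any (fun j =>
          (PySem.List.pyGetD sol i 0 == PySem.List.pyGetD sol j 0) &&
          (PySem.List.pyGetD graph i []).contains j)))

-- ===== PORT B =====
def check_teams_alt (graph : List (List Int)) (csp_sol : Option (List Int)) : Bool :=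
  match csp_sol with
  | none => false
  | some sol =>
    let n : Int := graph.length
    !((PySem.List.enumerate graph 0).any (fun p =>
        p.2.any (fun j =>
          (decide (p.1 < j) && decide (j < n)) &&
          (PySem.List.pyGetD sol j 0 == PySem.List.pyGetD sol p.1 0))))

-- ===== PRECONDITION & SPEC =====
-- Pre_ excludes a solution list shorter than the graph: there Python A raises IndexError
-- (except when an early conflict returns False first), and B's edge-driven scan raises on its own schedule.
def Pre_check_teams (graph : List (List Int)) (csp_sol : Option (List Int)) : Prop :=
  (match csp_sol with
   | none => true
   | some sol => decide (graph.length ≤ sol.length)) = true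
instance (graph : List (List Int)) (csp_sol : Option (List Int)) : Decidable (Pre_check_teams graph csp_sol) := by unfold Pre_check_teams; infer_instance

def pvWitness_check_teams : List (List Int) × Option (List Int) := ([[1], [0]], some [0, 1])

def Spec_check_teams (graph : List (List Int)) (csp_sol : Option (List Int)) (out : Bool) : Prop := out = check_teams_alt graph csp_sol
instance (graph : List (List Int)) (csp_sol : Option (List Int)) (out : Bool) : Decidable (Spec_check_teams graph csp_sol out) := by unfold Spec_check_teams; infer_instance

-- ===== CLAIM (what is proved, stated in full; the proofs are below) =====
def Claim_equal_check_teams : Prop := ∀ (graph : List (List Int)) (csp_sol : Option (List Int)), Dom_check_teams graph csp_sol → Pre_check_teams graph csp_sol → Spec_check_teams graph csp_sol (check_teams graph csp_sol)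

-- ===== LEMMAS AND PROOFS =====

-- Both 'any's detect the same conflicts: pairs i < j < |graph| with equal colors and j in graph[i].
theorem check_teams_any_iff (graph : List (List Int)) (sol : List Int)
    (hlen : graph.length ≤ sol.length) :
    ((PySem.List.pyRange 0 ((graph.length : Int) - 1) 1).any (fun i =>
        (PySem.List.pyRange (i + 1) (graph.length : Int) 1).any (fun j =>
          (PySem.List.pyGetD sol i 0 == PySem.List.pyGetD sol j 0) &&
          (PySem.List.pyGetD graph i []).contains j)))
    =
    ((PySem.List.enumerate graph 0).any (fun p =>
        p.2.any (fun j =>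
          (decide (p.1 < j) && decide (j < (graph.length : Int))) &&
          (PySem.List.pyGetD sol j 0 == PySem.List.pyGetD sol p.1 0)))) := by
  rw [Bool.eq_iff_iff]
  simp only [List.any_eq_true, PySem.List.mem_pyRange_one, PySem.List.mem_enumerate_iff,
    Bool.and_eq_true, beq_iff_eq, decide_eq_true_eq, List.contains_eq_mem, zero_add]
  constructor
  · rintro ⟨i, ⟨hi0, hi1⟩, j, ⟨hij, hjn⟩, heq, hmem⟩
    have hi : i.toNat < graph.length := by omega
    refine ⟨((i.toNat : Int), graph[i.toNat]), ⟨i.toNat, hi, rfl⟩, j, ?_, ⟨by omega, hjn⟩, ?_⟩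
    · rw [PySem.List.pyGetD_eq_getElem (xs := graph) (i := i) (d := ([] : List Int)) hi0 (by omega)] at hmem
      simpa using hmem
    · rw [PySem.List.pyGetD_eq_getElem (xs := sol) (i := i) (d := 0) hi0 (by omega),
          PySem.List.pyGetD_eq_getElem (xs := sol) (i := j) (d := 0) (by omega) (by omega)] at heq
      rw [PySem.List.pyGetD_eq_getElem (xs := sol) (i := (i.toNat : Int)) (d := 0) (by omega) (by omega),
          PySem.List.pyGetD_eq_getElem (xs := sol) (i := j) (d := 0) (by omega) (by omega)]
      simp only [Int.toNat_natCast]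
      exact heq.symm
  · rintro ⟨⟨i, row⟩, ⟨k, hk, hp⟩, j, hmem, ⟨hij, hjn⟩, heq⟩
    injection hp with hp1 hp2
    subst hp2
    simp only [hp1] at hij heq ⊢
    refine ⟨(k : Int), ⟨by omega, by omega⟩, j, ⟨by omega, hjn⟩, ?_, ?_⟩
    · rw [PySem.List.pyGetD_eq_getElem (xs := sol) (i := (k : Int)) (d := 0) (by omega) (by omega),
          PySem.List.pyGetD_eq_getElem (xs := sol) (i := j) (d := 0) (by omega) (by omega)] at heq ⊢
      exact heq.symm
    · rw [PySem.List.pyGetD_eq_getElem (xs := graph) (i := (k : Int)) (d := ([] : List Int)) (by omega) (by omega)]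
      simpa using hmem

-- ===== VERDICT (by name: the statement is the Claim_ definition above) =====
theorem check_teams_spec : Claim_equal_check_teams := by
  intro graph csp_sol _ hpre
  unfold Spec_check_teams check_teams check_teams_alt
  cases csp_sol with
  | none => rfl
  | some sol =>
    have hlen : graph.length ≤ sol.length := by
      unfold Pre_check_teams at hpre; simpa using hpre
    simp only
    rw [check_teams_any_iff graph sol hlen]
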